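-- pv_equiv track=rewrite | github.com/SungHwanYun/Coding-Test-in-One-Volume-with-Python-book- | 8-20.py | solve
-- ===== SOURCE A (Python) =====
-- def solve(u, color, A, E, D):
--     if D[u][color] != -1: return D[u][color]
--
--     D[u][color] = A[u][color]
--     for v in E[u]:
--         if color == 0:
--             D[u][color] += min(solve(v, 0, A, E, D), solve(v, 1, A, E, D))
--         else:
--             D[u][color] += solve(v, 0, A, E, D)
--
--     return D[u][color]
-- ===== SOURCE B (Python) =====
-- # Iterative re-implementation: explicit task stack emulating the same call order
-- # (memo-during-descent) as the recursive original; mutates D the same way.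
-- def solve(u, color, A, E, D):
--     tasks = [("call", u, color)]
--     vals = []
--     while tasks:
--         kind, x, c = tasks.pop()
--         if kind == "call":
--             if D[x][c] != -1:
--                 vals.append(D[x][c])
--             else:
--                 D[x][c] = A[x][c]
--                 sub = []
--                 for v in E[x]:
--                     if c == 0:
--                         sub += [("call", v, 0), ("call", v, 1), ("addmin", x, c)]
--                     else:
--                         sub += [("call", v, 0), ("add", x, c)]
--                 sub.append(("fin", x, c))
--                 tasks.extend(reversed(sub))
--         elif kind == "addmin":
--             r1 = vals.pop()
--             r0 = vals.pop()
--             D[x][c] += min(r0, r1)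
--         elif kind == "add":
--             D[x][c] += vals.pop()
--         else:
--             vals.append(D[x][c])
--     return vals[-1]
-- ===== Notes on version B (the rewrite author's own statement) =====
-- stated objective: alternative
-- what changed: The memoized recursion is replaced by an iterative explicit task-stack machine (call/addmin/add/fin frames with a value stack) that emulates the same memo-during-descent call order; equivalence is about the return value (both versions also mutate D identically on admitted inputs).
-- outside the precondition, e.g. on solve(0, 0, [[-5, 1]], [[]], [[-1, -1]]): A returns -5, B returns -5; on solve(-1, 0, [[1, 2], [3, 4]], [[], []], [[-1, -1], [-1, -1]]): A returns 3, B returns 3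
import Mathlib
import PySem

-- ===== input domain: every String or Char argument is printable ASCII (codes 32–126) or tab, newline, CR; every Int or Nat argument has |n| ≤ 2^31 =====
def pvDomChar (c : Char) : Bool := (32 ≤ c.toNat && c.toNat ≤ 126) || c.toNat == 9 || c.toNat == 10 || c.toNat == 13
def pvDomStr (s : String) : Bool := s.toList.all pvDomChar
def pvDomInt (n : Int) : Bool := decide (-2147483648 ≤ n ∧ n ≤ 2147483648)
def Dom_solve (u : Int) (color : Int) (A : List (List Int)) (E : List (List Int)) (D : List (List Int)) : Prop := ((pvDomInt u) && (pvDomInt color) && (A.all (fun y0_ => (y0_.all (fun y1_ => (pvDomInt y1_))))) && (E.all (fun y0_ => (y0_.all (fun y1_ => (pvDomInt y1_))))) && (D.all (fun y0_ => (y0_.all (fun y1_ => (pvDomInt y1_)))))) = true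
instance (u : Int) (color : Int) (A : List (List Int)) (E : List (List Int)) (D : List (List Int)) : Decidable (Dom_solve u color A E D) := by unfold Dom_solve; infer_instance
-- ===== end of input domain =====

-- B replaces the memoized recursion by an explicit task-stack iteration emulating the
-- same call order (alternative decomposition); equivalence is about the return value
-- (Python A and B both mutate D, in the same way on the admitted inputs).

-- shared read/write helpers (Python indexing: negative index from the end; out of
-- range would raise in Python, the helpers return a default / no-op there and such
-- inputs are excluded by Pre_solve)
def pyRowGet (D : List (List Int)) (u : Int) : List Int := (PySem.List.pyGet? D u).getD []

def pyCellGet (D : List (List Int)) (u c : Int) : Int := (PySem.List.pyGet? (pyRowGet D u) c).getD 0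

def pySet {α : Type} (xs : List α) (i : Int) (x : α) : List α :=
  let j : Int := if i < 0 then i + xs.length else i
  if 0 ≤ j ∧ j < xs.length then xs.set j.toNat x else xs

def pyCellSet (D : List (List Int)) (u c : Int) (x : Int) : List (List Int) :=
  pySet D u (pySet (pyRowGet D u) c x)

-- ===== PORT A =====
-- fuel-based transliteration of the recursion; the fuel guard only makes it total,
-- inside Pre_solve the fuel D.flatten.length + 2 is proved sufficient below
mutual
def solveA (f : Nat) (u c : Int) (A E D : List (List Int)) : Option (Int × List (List Int)) :=
  match f with
  | 0 => none
  | f' + 1 =>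
    let cur := pyCellGet D u c
    if cur ≠ -1 then some (cur, D)
    else
      let D1 := pyCellSet D u c (pyCellGet A u c)
      match foldCh f' c A E (pyRowGet E u) u D1 with
      | none => none
      | some D2 => some (pyCellGet D2 u c, D2)
termination_by (f, 0)

def foldCh (f : Nat) (c : Int) (A E : List (List Int)) (vs : List Int) (u : Int) (D : List (List Int)) : Option (List (List Int)) :=
  match vs with
  | [] => some D
  | v :: vs' =>
    if c == 0 then
      match solveA f v 0 A E D with
      | none => none
      | some (r0, Da) =>
        match solveA f v 1 A E Da with
        | none => none
        | some (r1, Db) => foldCh f c A E vs' u (pyCellSet Db u c (pyCellGet Db u c + min r0 r1))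
    else
      match solveA f v 0 A E D with
      | none => none
      | some (r, Da) => foldCh f c A E vs' u (pyCellSet Da u c (pyCellGet Da u c + r))
termination_by (f, vs.length + 1)
end

def solve (u : Int) (color : Int) (A : List (List Int)) (E : List (List Int)) (D : List (List Int)) : Int :=
  match solveA (D.flatten.length + 2) u color A E D with
  | some (r, _) => r
  | none => 0

-- ===== PORT B =====
inductive PVTask where
  | call : Int → Int → PVTask
  | addmin : Int → Int → PVTask
  | add : Int → Int → PVTask
  | fin : Int → Int → PVTask
deriving DecidableEq, Repr

-- one iteration of Source B's while loop (pop the top task and process it)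
def stepB (A E : List (List Int)) : List PVTask × List Int × List (List Int) → List PVTask × List Int × List (List Int)
  | ([], vs, D) => ([], vs, D)
  | (PVTask.call u c :: ts, vs, D) =>
    let cur := pyCellGet D u c
    if cur ≠ -1 then (ts, cur :: vs, D)
    else
      let D1 := pyCellSet D u c (pyCellGet A u c)
      let sub := (pyRowGet E u).flatMap
          (fun v => if c == 0 then [PVTask.call v 0, PVTask.call v 1, PVTask.addmin u c]
                    else [PVTask.call v 0, PVTask.add u c]) ++ [PVTask.fin u c]
      (sub ++ ts, vs, D1)
  | (PVTask.addmin u c :: ts, vs, D) =>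
    (ts, vs.tail.tail, pyCellSet D u c (pyCellGet D u c + min vs.tail.headI vs.headI))
  | (PVTask.add u c :: ts, vs, D) =>
    (ts, vs.tail, pyCellSet D u c (pyCellGet D u c + vs.headI))
  | (PVTask.fin u c :: ts, vs, D) =>
    (ts, pyCellGet D u c :: vs, D)

-- Source B's while loop, with a fuel guard that only makes it total (proved sufficient below)
def runB (A E : List (List Int)) : Nat → List PVTask × List Int × List (List Int) → List Int × List (List Int)
  | 0, (_, vs, D) => (vs, D)
  | _ + 1, ([], vs, D) => (vs, D)
  | n + 1, (t :: ts, vs, D) => runB A E n (stepB A E (t :: ts, vs, D))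

def solve_alt (u : Int) (color : Int) (A : List (List Int)) (E : List (List Int)) (D : List (List Int)) : Int :=
  (runB A E ((3 * E.flatten.length + 3) ^ (D.flatten.length + 2)) ([PVTask.call u color], [], D)).1.headI

-- ===== PRECONDITION & SPEC =====
-- Pre_solve admits every immediate memo-hit call (D[u][color] exists and is not -1,
-- including Python's negative-index wraparound) and otherwise requires a well-formed
-- DP instance: u in range, color 0 or 1, A and D at least as long as E with rows of
-- length ≥ 2, edge targets in [0, len(E)), nonnegative costs in A, and D entries
-- nonnegative or the sentinel -1.  It excludes raising out-of-range accesses, and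
-- instances where negative values collide with the -1 memo sentinel or indices wrap,
-- on which A's value (or termination) is an accident of re-entrant re-expansion order.
def Pre_solve (u : Int) (color : Int) (A : List (List Int)) (E : List (List Int)) (D : List (List Int)) : Prop :=
  (((PySem.List.pyGet? D u).bind (fun row => PySem.List.pyGet? row color)) ≠ none ∧
   ((PySem.List.pyGet? D u).bind (fun row => PySem.List.pyGet? row color)) ≠ some (-1)) ∨
  (0 ≤ u ∧ u < (E.length : Int) ∧ (color = 0 ∨ color = 1) ∧
   E.length ≤ A.length ∧ E.length ≤ D.length ∧
   (∀ row ∈ A, 2 ≤ row.length ∧ ∀ x ∈ row.take 2, 0 ≤ x) ∧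
   (∀ row ∈ D, 2 ≤ row.length ∧ ∀ x ∈ row.take 2, (x = -1 ∨ 0 ≤ x)) ∧
   (∀ row ∈ E, ∀ v ∈ row, 0 ≤ v ∧ v < (E.length : Int)))

instance (u : Int) (color : Int) (A : List (List Int)) (E : List (List Int)) (D : List (List Int)) : Decidable (Pre_solve u color A E D) := by unfold Pre_solve; infer_instance

def pvWitness_solve : Int × Int × List (List Int) × List (List Int) × List (List Int) :=
  (0, 0, [[1, 2], [3, 4]], [[1], []], [[-1, -1], [-1, -1]])

def Spec_solve (u : Int) (color : Int) (A : List (List Int)) (E : List (List Int)) (D : List (List Int)) (out : Int) : Prop := out = solve_alt u color A E D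
instance (u : Int) (color : Int) (A : List (List Int)) (E : List (List Int)) (D : List (List Int)) (out : Int) : Decidable (Spec_solve u color A E D out) := by unfold Spec_solve; infer_instance

-- ===== CLAIM (what is proved, stated in full; the proofs are below) =====
def Claim_equal_solve : Prop := ∀ (u : Int) (color : Int) (A : List (List Int)) (E : List (List Int)) (D : List (List Int)), Dom_solve u color A E D → Pre_solve u color A E D → Spec_solve u color A E D (solve u color A E D)

-- ===== LEMMAS AND PROOFS =====

-- Nat-indexed views of the table used only in the proofs
def cellN (D : List (List Int)) (i j : Nat) : Int := (D.getD i []).getD j 0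
def setN (D : List (List Int)) (i j : Nat) (x : Int) : List (List Int) := D.set i ((D.getD i []).set j x)
def cntRow (r : List Int) : Nat := (r.filter (fun x => x == -1)).length
def cnt (D : List (List Int)) : Nat := (D.map cntRow).sum
def ShapeEq (D D' : List (List Int)) : Prop := D'.length = D.length ∧ ∀ i : Nat, (D'.getD i []).length = (D.getD i []).length
def Stable (D D' : List (List Int)) : Prop := ∀ i j : Nat, 0 ≤ cellN D i j → 0 ≤ cellN D' i j
def GoodD (E D : List (List Int)) : Prop := E.length ≤ D.length ∧ ∀ row ∈ D, 2 ≤ row.length ∧ ∀ x ∈ row.take 2, (x = -1 ∨ 0 ≤ x)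
def GoodA (E A : List (List Int)) : Prop := E.length ≤ A.length ∧ ∀ row ∈ A, 2 ≤ row.length ∧ ∀ x ∈ row.take 2, 0 ≤ x
def GoodE (E : List (List Int)) : Prop := ∀ row ∈ E, ∀ v ∈ row, 0 ≤ v ∧ v < (E.length : Int)

-- bridges Python-index helpers → Nat views (for nonnegative indices)
theorem pySet_inrange {α : Type} (xs : List α) (i : Int) (x : α) (h0 : 0 ≤ i) (h1 : i.toNat < xs.length) :
    pySet xs i x = xs.set i.toNat x := by
  have hj : (if i < 0 then i + (xs.length : Int) else i) = i := if_neg (by omega)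
  simp only [pySet, hj]
  rw [if_pos ⟨h0, by omega⟩]

theorem getD_set_self {α : Type} (l : List α) (i : Nat) (a d : α) (h : i < l.length) :
    (l.set i a).getD i d = a := by
  rw [List.getD_eq_getElem?_getD, List.getElem?_set, if_pos rfl, if_pos h]; rfl

theorem getD_set_ne {α : Type} (l : List α) (i i' : Nat) (a d : α) (h : i ≠ i') :
    (l.set i a).getD i' d = l.getD i' d := by
  rw [List.getD_eq_getElem?_getD, List.getElem?_set, if_neg h, ← List.getD_eq_getElem?_getD]

theorem pyCellGet_eq_cellN (D : List (List Int)) (u c : Int) (hu : 0 ≤ u) (hc : 0 ≤ c) :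
    pyCellGet D u c = cellN D u.toNat c.toNat := by
  unfold pyCellGet pyRowGet cellN
  rw [PySem.List.pyGet?_of_nonneg D hu, PySem.List.pyGet?_of_nonneg _ hc]
  rw [List.getD_eq_getElem?_getD, List.getD_eq_getElem?_getD]

theorem pyCellSet_eq_setN (D : List (List Int)) (u c : Int) (x : Int) (hu : 0 ≤ u) (hc : 0 ≤ c)
    (hu2 : u.toNat < D.length) (hc2 : c.toNat < (D.getD u.toNat []).length) :
    pyCellSet D u c x = setN D u.toNat c.toNat x := by
  unfold pyCellSet setN
  have hrow : pyRowGet D u = D.getD u.toNat [] := by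
    unfold pyRowGet
    rw [PySem.List.pyGet?_of_nonneg D hu, List.getD_eq_getElem?_getD]
  rw [hrow, pySet_inrange _ c x hc (by omega), pySet_inrange _ u _ hu (by omega)]

theorem cellN_setN_same (D : List (List Int)) (i j : Nat) (x : Int)
    (hi : i < D.length) (hj : j < (D.getD i []).length) :
    cellN (setN D i j x) i j = x := by
  unfold cellN setN
  rw [getD_set_self _ _ _ _ hi, getD_set_self _ _ _ _ hj]

theorem cellN_setN_other (D : List (List Int)) (i j i' j' : Nat) (x : Int)
    (h : i' ≠ i ∨ j' ≠ j) : cellN (setN D i j x) i' j' = cellN D i' j' := by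
  unfold cellN setN
  rcases eq_or_ne i i' with hii | hii
  · subst hii
    rcases h with h | h
    · omega
    · by_cases hlen : i < D.length
      · rw [getD_set_self _ _ _ _ hlen, getD_set_ne _ _ _ _ _ (by omega)]
      · rw [List.set_eq_of_length_le (by omega)]
  · rw [getD_set_ne _ _ _ _ _ hii]

theorem shape_setN (D : List (List Int)) (i j : Nat) (x : Int) : ShapeEq D (setN D i j x) := by
  refine ⟨List.length_set, fun i' => ?_⟩
  unfold setN
  rcases eq_or_ne i i' with hii | hii
  · subst hii
    by_cases hlen : i < D.length
    · rw [getD_set_self _ _ _ _ hlen, List.length_set]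
    · rw [List.set_eq_of_length_le (by omega)]
  · rw [getD_set_ne _ _ _ _ _ hii]

theorem Stable_setN (D : List (List Int)) (i j : Nat) (x : Int) (hx : 0 ≤ x) :
    Stable D (setN D i j x) := by
  intro i' j' hcell
  rcases eq_or_ne i' i with hii | hii
  · rcases eq_or_ne j' j with hjj | hjj
    · subst hii; subst hjj
      by_cases hi : i' < D.length
      · by_cases hj : j' < (D.getD i' []).length
        · rw [cellN_setN_same D i' j' x hi hj]; exact hx
        · unfold cellN setN
          rw [getD_set_self _ _ _ _ hi, List.set_eq_of_length_le (by omega)]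
          exact hcell
      · unfold cellN setN
        rw [List.set_eq_of_length_le (by omega)]
        exact hcell
    · rw [cellN_setN_other D i j i' j' x (Or.inr hjj)]; exact hcell
  · rw [cellN_setN_other D i j i' j' x (Or.inl hii)]; exact hcell

theorem ShapeEq_rfl (D : List (List Int)) : ShapeEq D D := ⟨rfl, fun _ => rfl⟩
theorem ShapeEq_trans {D1 D2 D3 : List (List Int)} (h1 : ShapeEq D1 D2) (h2 : ShapeEq D2 D3) : ShapeEq D1 D3 :=
  ⟨h2.1.trans h1.1, fun i => (h2.2 i).trans (h1.2 i)⟩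
theorem Stable_rfl (D : List (List Int)) : Stable D D := fun _ _ h => h
theorem Stable_trans {D1 D2 D3 : List (List Int)} (h1 : Stable D1 D2) (h2 : Stable D2 D3) : Stable D1 D3 :=
  fun i j h => h2 i j (h1 i j h)

theorem cntRow_cons (y : Int) (t : List Int) :
    cntRow (y :: t) = (if y = -1 then 1 else 0) + cntRow t := by
  unfold cntRow
  rw [List.filter_cons]
  by_cases h : y = -1
  · simp [h]; omega
  · simp [h]

theorem cntRow_set (r : List Int) (j : Nat) (x : Int) (hj : j < r.length) (hx : x ≠ -1) :
    cntRow (r.set j x) + (if r.getD j 0 = -1 then 1 else 0) = cntRow r := by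
  induction r generalizing j with
  | nil => simp at hj
  | cons y t ih =>
    cases j with
    | zero =>
      rw [List.set_cons_zero, List.getD_cons_zero, cntRow_cons, cntRow_cons, if_neg hx]
      omega
    | succ j' =>
      rw [List.set_cons_succ, List.getD_cons_succ, cntRow_cons, cntRow_cons]
      have := ih j' (by simpa using hj)
      omega

theorem sum_set_nat (l : List Nat) (i : Nat) (a : Nat) (hi : i < l.length) :
    (l.set i a).sum + l.getD i 0 = l.sum + a := by
  induction l generalizing i with
  | nil => simp at hi
  | cons y t ih =>
    cases i with
    | zero => simp; omega
    | succ i' =>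
      simp only [List.set_cons_succ, List.sum_cons, List.getD_cons_succ]
      have := ih i' (by simpa using hi)
      omega

theorem cnt_setN (D : List (List Int)) (i j : Nat) (x : Int)
    (hi : i < D.length) (hj : j < (D.getD i []).length) (hx : x ≠ -1) :
    cnt (setN D i j x) + (if cellN D i j = -1 then 1 else 0) = cnt D := by
  unfold cnt setN cellN
  rw [List.map_set]
  have hmap : (D.map cntRow).getD i 0 = cntRow (D.getD i []) := by
    rw [List.getD_eq_getElem?_getD, List.getD_eq_getElem?_getD, List.getElem?_map]
    cases h : D[i]? with
    | none => rfl
    | some r => rfl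
  have hsum := sum_set_nat (D.map cntRow) i (cntRow ((D.getD i []).set j x)) (by simpa using hi)
  rw [hmap] at hsum
  have hrow := cntRow_set (D.getD i []) j x hj hx
  omega

theorem GoodD_setN (E D : List (List Int)) (i j : Nat) (x : Int) (hg : GoodD E D)
    (hx : x = -1 ∨ 0 ≤ x) : GoodD E (setN D i j x) := by
  obtain ⟨hlen, hrows⟩ := hg
  by_cases hi2 : i < D.length
  · refine ⟨by rw [setN, List.length_set]; exact hlen, ?_⟩
    intro row hrow
    rcases List.mem_or_eq_of_mem_set hrow with hmem | heq
    · exact hrows row hmem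
    · subst heq
      have hDi : D.getD i [] ∈ D := by
        rw [List.getD_eq_getElem?_getD, List.getElem?_eq_getElem hi2]
        exact List.getElem_mem hi2
      obtain ⟨h2, hgood⟩ := hrows _ hDi
      refine ⟨by rw [List.length_set]; exact h2, ?_⟩
      intro y hy
      rw [List.take_set] at hy
      rcases List.mem_or_eq_of_mem_set hy with hy2 | hy2
      · exact hgood y hy2
      · subst hy2; exact hx
  · unfold setN
    rw [List.set_eq_of_length_le (by omega)]
    exact ⟨hlen, hrows⟩

theorem getD_mem_take_two (r : List Int) (j : Nat) (h2 : 2 ≤ r.length) (hj : j < 2) :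
    r.getD j 0 ∈ r.take 2 := by
  have hjlen : j < r.length := by omega
  rw [List.getD_eq_getElem?_getD, List.getElem?_eq_getElem hjlen, Option.getD_some]
  have hjt : j < (r.take 2).length := by rw [List.length_take]; omega
  have : r[j] = (r.take 2)[j]'hjt := List.getElem_take.symm
  rw [this]
  exact List.getElem_mem hjt

theorem cellN_good (E D : List (List Int)) (hg : GoodD E D) (i j : Nat)
    (hi : i < D.length) (hj : j < 2) : cellN D i j = -1 ∨ 0 ≤ cellN D i j := by
  obtain ⟨_, hrows⟩ := hg
  have hDi : D.getD i [] ∈ D := by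
    rw [List.getD_eq_getElem?_getD, List.getElem?_eq_getElem hi]
    exact List.getElem_mem hi
  obtain ⟨h2, hgood⟩ := hrows _ hDi
  exact hgood _ (getD_mem_take_two _ j h2 hj)

theorem cellN_goodA (E A : List (List Int)) (hg : GoodA E A) (i j : Nat)
    (hi : i < A.length) (hj : j < 2) : 0 ≤ cellN A i j := by
  obtain ⟨_, hrows⟩ := hg
  have hAi : A.getD i [] ∈ A := by
    rw [List.getD_eq_getElem?_getD, List.getElem?_eq_getElem hi]
    exact List.getElem_mem hi
  obtain ⟨h2, hgood⟩ := hrows _ hAi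
  exact hgood _ (getD_mem_take_two _ j h2 hj)

theorem cnt_le_flatten (D : List (List Int)) : cnt D ≤ D.flatten.length := by
  unfold cnt
  rw [List.length_flatten]
  exact List.sum_le_sum (fun r _ => List.length_filter_le _ r)

theorem rowlen_le_flatten (E : List (List Int)) (u : Int) :
    (pyRowGet E u).length ≤ E.flatten.length := by
  unfold pyRowGet
  cases h : PySem.List.pyGet? E u with
  | none => simp
  | some row =>
    have hmem := PySem.List.mem_of_pyGet?_eq_some E h
    simp only [Option.getD_some]
    rw [List.length_flatten]
    exact List.single_le_sum (fun x _ => Nat.zero_le x) _ (List.mem_map_of_mem hmem)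

-- sufficiency of the fuel for port A, plus the invariants used along the way
def SufP (A E : List (List Int)) (f : Nat) : Prop :=
  ∀ u c D, GoodD E D → 0 ≤ u → u < (E.length : Int) → (c = 0 ∨ c = 1) → cnt D < f →
  ∃ r D', solveA f u c A E D = some (r, D') ∧ 0 ≤ r ∧ GoodD E D' ∧ ShapeEq D D' ∧ cnt D' ≤ cnt D ∧ Stable D D'

theorem suf_fold (A E : List (List Int)) (_hA : GoodA E A) (_hE : GoodE E) (f : Nat) (IH : SufP A E f) :
    ∀ cs u c D, GoodD E D → (∀ v ∈ cs, 0 ≤ v ∧ v < (E.length : Int)) → (c = 0 ∨ c = 1) →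
      0 ≤ u → u < (E.length : Int) → cnt D < f → 0 ≤ cellN D u.toNat c.toNat →
    ∃ D2, foldCh f c A E cs u D = some D2 ∧ GoodD E D2 ∧ ShapeEq D D2 ∧ cnt D2 ≤ cnt D ∧ Stable D D2 := by
  intro cs
  induction cs with
  | nil =>
    intro u c D hD hcs hc hu hulen hcnt hcell
    exact ⟨D, by rw [foldCh], hD, ShapeEq_rfl D, le_refl _, Stable_rfl D⟩
  | cons v vs' ih =>
    intro u c D hD hcs hc hu hulen hcnt hcell
    have hv := hcs v (List.mem_cons_self)
    have hcs' : ∀ w ∈ vs', 0 ≤ w ∧ w < (E.length : Int) := fun w hw => hcs w (List.mem_cons_of_mem v hw)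
    obtain ⟨r0, Da, hs0, hr0, hDa, hsh0, hcnt0, hst0⟩ :=
      IH v 0 D hD hv.1 hv.2 (Or.inl rfl) hcnt
    -- common facts about writing into the table at (u, c)
    have hulen' : u.toNat < E.length := by omega
    rcases hc with hc0 | hc1
    · subst hc0
      obtain ⟨r1, Db, hs1, hr1, hDb, hsh1, hcnt1, hst1⟩ :=
        IH v 1 Da hDa hv.1 hv.2 (Or.inr rfl) (by omega)
      have hub : u.toNat < Db.length := by have := hDb.1; omega
      have hrowb : Db.getD u.toNat [] ∈ Db := by
        rw [List.getD_eq_getElem?_getD, List.getElem?_eq_getElem hub]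
        exact List.getElem_mem hub
      have hrowlen : (2:Nat) ≤ (Db.getD u.toNat []).length := (hDb.2 _ hrowb).1
      have hcellb : 0 ≤ cellN Db u.toNat (0:Int).toNat := hst1 _ _ (hst0 _ _ hcell)
      have hval : 0 ≤ cellN Db u.toNat (0:Int).toNat + min r0 r1 := by
        have : (0:Int) ≤ min r0 r1 := le_min hr0 hr1
        omega
      have hset : pyCellSet Db u 0 (pyCellGet Db u 0 + min r0 r1)
          = setN Db u.toNat (0:Int).toNat (cellN Db u.toNat (0:Int).toNat + min r0 r1) := by
        rw [pyCellGet_eq_cellN Db u 0 hu (by omega)]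
        exact pyCellSet_eq_setN Db u 0 _ hu (by omega) hub (by omega)
      set val := cellN Db u.toNat (0:Int).toNat + min r0 r1 with hvaldef
      have hDn : GoodD E (setN Db u.toNat (0:Int).toNat val) := GoodD_setN E Db _ _ _ hDb (Or.inr hval)
      have hcntn : cnt (setN Db u.toNat (0:Int).toNat val) ≤ cnt Db := by
        have := cnt_setN Db u.toNat (0:Int).toNat val hub (by omega) (by omega)
        have hnot : ¬ cellN Db u.toNat (0:Int).toNat = -1 := by omega
        rw [if_neg hnot] at this
        omega
      have hcelln : 0 ≤ cellN (setN Db u.toNat (0:Int).toNat val) u.toNat (0:Int).toNat := by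
        rw [cellN_setN_same Db _ _ val hub (by omega)]
        exact hval
      obtain ⟨D2, hfold, hD2, hsh2, hcnt2, hst2⟩ :=
        ih u 0 (setN Db u.toNat (0:Int).toNat val) hDn hcs' (Or.inl rfl) hu hulen (by omega) hcelln
      refine ⟨D2, ?_, hD2, ?_, by omega, ?_⟩
      · rw [foldCh]
        simp only [hs0, hs1]
        rw [hset]
        simpa using hfold
      · exact ShapeEq_trans hsh0 (ShapeEq_trans hsh1 (ShapeEq_trans (shape_setN Db _ _ val) hsh2))
      · exact Stable_trans hst0 (Stable_trans hst1 (Stable_trans (Stable_setN Db _ _ val hval) hst2))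
    · subst hc1
      have hub : u.toNat < Da.length := by have := hDa.1; omega
      have hrowb : Da.getD u.toNat [] ∈ Da := by
        rw [List.getD_eq_getElem?_getD, List.getElem?_eq_getElem hub]
        exact List.getElem_mem hub
      have hrowlen : (2:Nat) ≤ (Da.getD u.toNat []).length := (hDa.2 _ hrowb).1
      have hcellb : 0 ≤ cellN Da u.toNat (1:Int).toNat := hst0 _ _ hcell
      have hval : 0 ≤ cellN Da u.toNat (1:Int).toNat + r0 := by omega
      have hset : pyCellSet Da u 1 (pyCellGet Da u 1 + r0)
          = setN Da u.toNat (1:Int).toNat (cellN Da u.toNat (1:Int).toNat + r0) := by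
        rw [pyCellGet_eq_cellN Da u 1 hu (by omega)]
        exact pyCellSet_eq_setN Da u 1 _ hu (by omega) hub (by omega)
      set val := cellN Da u.toNat (1:Int).toNat + r0 with hvaldef
      have hDn : GoodD E (setN Da u.toNat (1:Int).toNat val) := GoodD_setN E Da _ _ _ hDa (Or.inr hval)
      have hcntn : cnt (setN Da u.toNat (1:Int).toNat val) ≤ cnt Da := by
        have := cnt_setN Da u.toNat (1:Int).toNat val hub (by omega) (by omega)
        have hnot : ¬ cellN Da u.toNat (1:Int).toNat = -1 := by omega
        rw [if_neg hnot] at this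
        omega
      have hcelln : 0 ≤ cellN (setN Da u.toNat (1:Int).toNat val) u.toNat (1:Int).toNat := by
        rw [cellN_setN_same Da _ _ val hub (by omega)]
        exact hval
      obtain ⟨D2, hfold, hD2, hsh2, hcnt2, hst2⟩ :=
        ih u 1 (setN Da u.toNat (1:Int).toNat val) hDn hcs' (Or.inr rfl) hu hulen (by omega) hcelln
      refine ⟨D2, ?_, hD2, ?_, by omega, ?_⟩
      · rw [foldCh]
        simp only [hs0]
        rw [hset]
        simpa using hfold
      · exact ShapeEq_trans hsh0 (ShapeEq_trans (shape_setN Da _ _ val) hsh2)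
      · exact Stable_trans hst0 (Stable_trans (Stable_setN Da _ _ val hval) hst2)

theorem suf_solve (A E : List (List Int)) (hA : GoodA E A) (hE : GoodE E) : ∀ f, SufP A E f := by
  intro f
  induction f with
  | zero => intro u c D _ _ _ _ hcnt; omega
  | succ f' IH =>
    intro u c D hD hu hulen hc hcnt
    have hud : u.toNat < D.length := by have := hD.1; omega
    have hctn : c.toNat < 2 := by rcases hc with h | h <;> simp [h]
    have hcur : pyCellGet D u c = cellN D u.toNat c.toNat :=
      pyCellGet_eq_cellN D u c hu (by rcases hc with h | h <;> simp [h])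
    by_cases hmemo : pyCellGet D u c ≠ -1
    · refine ⟨pyCellGet D u c, D, ?_, ?_, hD, ShapeEq_rfl D, le_refl _, Stable_rfl D⟩
      · rw [solveA, if_pos hmemo]
      · rcases cellN_good E D hD u.toNat c.toNat hud hctn with h | h
        · rw [hcur] at hmemo; omega
        · rw [hcur]; exact h
    · -- expansion: write A[u][c] (≥ 0) over the -1 sentinel, then fold over the children
      have hcell_neg : cellN D u.toNat c.toNat = -1 := by rw [hcur] at hmemo; omega
      have hua : u.toNat < A.length := by have := hA.1; omega
      have ha : 0 ≤ pyCellGet A u c := by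
        rw [pyCellGet_eq_cellN A u c hu (by rcases hc with h | h <;> simp [h])]
        exact cellN_goodA E A hA u.toNat c.toNat hua hctn
      have hrowD : D.getD u.toNat [] ∈ D := by
        rw [List.getD_eq_getElem?_getD, List.getElem?_eq_getElem hud]
        exact List.getElem_mem hud
      have hrowlen : (2:Nat) ≤ (D.getD u.toNat []).length := (hD.2 _ hrowD).1
      have hset : pyCellSet D u c (pyCellGet A u c) = setN D u.toNat c.toNat (pyCellGet A u c) :=
        pyCellSet_eq_setN D u c _ hu (by rcases hc with h | h <;> simp [h]) hud (by omega)
      set a := pyCellGet A u c with hadef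
      have hD1 : GoodD E (setN D u.toNat c.toNat a) := GoodD_setN E D _ _ _ hD (Or.inr ha)
      have hcnt1 : cnt (setN D u.toNat c.toNat a) + 1 = cnt D := by
        have := cnt_setN D u.toNat c.toNat a hud (by omega) (by omega)
        rw [if_pos hcell_neg] at this
        omega
      have hcell1 : 0 ≤ cellN (setN D u.toNat c.toNat a) u.toNat c.toNat := by
        rw [cellN_setN_same D _ _ a hud (by omega)]
        exact ha
      have hrowE : ∀ v ∈ pyRowGet E u, 0 ≤ v ∧ v < (E.length : Int) := by
        intro v hvmem
        unfold pyRowGet at hvmem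
        cases hEu : PySem.List.pyGet? E u with
        | none => rw [hEu] at hvmem; simp at hvmem
        | some row =>
          rw [hEu] at hvmem
          simp only [Option.getD_some] at hvmem
          exact hE row (PySem.List.mem_of_pyGet?_eq_some E hEu) v hvmem
      obtain ⟨D2, hfold, hD2, hsh2, hcnt2, hst2⟩ :=
        suf_fold A E hA hE f' IH (pyRowGet E u) u c (setN D u.toNat c.toNat a) hD1 hrowE hc hu hulen
          (by omega) hcell1
      refine ⟨pyCellGet D2 u c, D2, ?_, ?_, hD2, ?_, by omega, ?_⟩
      · rw [solveA, if_neg hmemo, hset]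
        simp only [hfold]
      · rw [pyCellGet_eq_cellN D2 u c hu (by rcases hc with h | h <;> simp [h])]
        exact hst2 _ _ hcell1
      · exact ShapeEq_trans (shape_setN D _ _ a) hsh2
      · exact Stable_trans (Stable_setN D _ _ a ha) hst2

-- simulation: the task-stack machine of port B runs port A's recursion step for step
def encodeB (c u : Int) (vs : List Int) : List PVTask :=
  vs.flatMap (fun v => if c == 0 then [PVTask.call v 0, PVTask.call v 1, PVTask.addmin u c]
                       else [PVTask.call v 0, PVTask.add u c])

def SimP (A E : List (List Int)) (f : Nat) : Prop :=
  ∀ u c D r D', solveA f u c A E D = some (r, D') →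
  ∀ ts vs, ∃ k ≤ (3 * E.flatten.length + 3) ^ f,
    (stepB A E)^[k] (PVTask.call u c :: ts, vs, D) = (ts, r :: vs, D')

theorem iter_chain {α : Type} (f : α → α) {m n : Nat} {x y z : α}
    (h1 : f^[m] x = y) (h2 : f^[n] y = z) : f^[n + m] x = z := by
  rw [Function.iterate_add_apply, h1, h2]

theorem sim_fold (A E : List (List Int)) (f : Nat) (IH : SimP A E f) :
    ∀ cs c u D D2, foldCh f c A E cs u D = some D2 →
    ∀ ts vs, ∃ k ≤ cs.length * (2 * (3 * E.flatten.length + 3) ^ f + 1),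
      (stepB A E)^[k] (encodeB c u cs ++ ts, vs, D) = (ts, vs, D2) := by
  intro cs
  induction cs with
  | nil =>
    intro c u D D2 h ts vs
    rw [foldCh] at h
    obtain rfl : D = D2 := by simpa using h
    exact ⟨0, Nat.zero_le _, by simp [encodeB]⟩
  | cons v vs' ih =>
    intro c u D D2 h ts vs
    rw [foldCh] at h
    by_cases hc : c = 0
    · subst hc
      simp only [beq_self_eq_true, if_true] at h
      cases hs0 : solveA f v 0 A E D with
      | none => simp [hs0] at h
      | some p0 =>
        obtain ⟨r0, Da⟩ := p0
        simp only [hs0] at h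
        cases hs1 : solveA f v 1 A E Da with
        | none => simp [hs1] at h
        | some p1 =>
          obtain ⟨r1, Db⟩ := p1
          simp only [hs1] at h
          obtain ⟨k0, hk0, e1⟩ := IH v 0 D r0 Da hs0
            (PVTask.call v 1 :: PVTask.addmin u 0 :: (encodeB 0 u vs' ++ ts)) vs
          obtain ⟨k1, hk1, e2⟩ := IH v 1 Da r1 Db hs1
            (PVTask.addmin u 0 :: (encodeB 0 u vs' ++ ts)) (r0 :: vs)
          have e3 : (stepB A E)^[1] (PVTask.addmin u 0 :: (encodeB 0 u vs' ++ ts), r1 :: r0 :: vs, Db)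
              = (encodeB 0 u vs' ++ ts, vs, pyCellSet Db u 0 (pyCellGet Db u 0 + min r0 r1)) := by
            simp [stepB]
          obtain ⟨kr, hkr, e4⟩ := ih 0 u (pyCellSet Db u 0 (pyCellGet Db u 0 + min r0 r1)) D2 h ts vs
          have henc : encodeB 0 u (v :: vs') ++ ts
              = PVTask.call v 0 :: PVTask.call v 1 :: PVTask.addmin u 0 :: (encodeB 0 u vs' ++ ts) := by
            simp [encodeB]
          refine ⟨kr + (1 + (k1 + k0)), ?_, ?_⟩
          · have hm : (vs'.length + 1) * (2 * (3 * E.flatten.length + 3) ^ f + 1)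
                = vs'.length * (2 * (3 * E.flatten.length + 3) ^ f + 1)
                  + (2 * (3 * E.flatten.length + 3) ^ f + 1) := Nat.succ_mul _ _
            simp only [List.length_cons]
            omega
          · rw [henc]
            exact iter_chain _ (iter_chain _ (iter_chain _ e1 e2) e3) e4
    · have hcb : (c == 0) = false := by simp [hc]
      rw [hcb] at h
      simp only [Bool.false_eq_true, if_false] at h
      cases hs0 : solveA f v 0 A E D with
      | none => simp [hs0] at h
      | some p0 =>
        obtain ⟨r0, Da⟩ := p0
        simp only [hs0] at h
        obtain ⟨k0, hk0, e1⟩ := IH v 0 D r0 Da hs0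
          (PVTask.add u c :: (encodeB c u vs' ++ ts)) vs
        have e3 : (stepB A E)^[1] (PVTask.add u c :: (encodeB c u vs' ++ ts), r0 :: vs, Da)
            = (encodeB c u vs' ++ ts, vs, pyCellSet Da u c (pyCellGet Da u c + r0)) := by
          simp [stepB]
        obtain ⟨kr, hkr, e4⟩ := ih c u (pyCellSet Da u c (pyCellGet Da u c + r0)) D2 h ts vs
        have henc : encodeB c u (v :: vs') ++ ts
            = PVTask.call v 0 :: PVTask.add u c :: (encodeB c u vs' ++ ts) := by
          simp [encodeB, hcb]
        refine ⟨kr + (1 + k0), ?_, ?_⟩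
        · have hm : (vs'.length + 1) * (2 * (3 * E.flatten.length + 3) ^ f + 1)
              = vs'.length * (2 * (3 * E.flatten.length + 3) ^ f + 1)
                + (2 * (3 * E.flatten.length + 3) ^ f + 1) := Nat.succ_mul _ _
          simp only [List.length_cons]
          omega
        · rw [henc]
          exact iter_chain _ (iter_chain _ e1 e3) e4

theorem sim_solve (A E : List (List Int)) : ∀ f, SimP A E f := by
  intro f
  induction f with
  | zero => intro u c D r D' h; rw [solveA] at h; simp at h
  | succ f' IH =>
    intro u c D r D' h ts vs
    rw [solveA] at h
    by_cases hmemo : pyCellGet D u c ≠ -1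
    · rw [if_pos hmemo] at h
      simp only [Option.some.injEq, Prod.mk.injEq] at h
      obtain ⟨rfl, rfl⟩ : r = pyCellGet D u c ∧ D' = D := ⟨h.1.symm, h.2.symm⟩
      refine ⟨1, Nat.one_le_pow _ _ (by omega), ?_⟩
      simp [stepB, hmemo]
    · rw [if_neg hmemo] at h
      cases hfold : foldCh f' c A E (pyRowGet E u) u (pyCellSet D u c (pyCellGet A u c)) with
      | none => simp [hfold] at h
      | some D2 =>
        simp only [hfold, Option.some.injEq, Prod.mk.injEq] at h
        obtain ⟨rfl, rfl⟩ := h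
        have e1 : (stepB A E)^[1] (PVTask.call u c :: ts, vs, D)
            = (encodeB c u (pyRowGet E u) ++ (PVTask.fin u c :: ts), vs,
               pyCellSet D u c (pyCellGet A u c)) := by
          simp [stepB, hmemo, encodeB]
        obtain ⟨kf, hkf, e2⟩ := sim_fold A E f' IH (pyRowGet E u) c u _ D2 hfold
          (PVTask.fin u c :: ts) vs
        have e3 : (stepB A E)^[1] (PVTask.fin u c :: ts, vs, D2)
            = (ts, pyCellGet D2 u c :: vs, D2) := by simp [stepB]
        refine ⟨1 + (kf + 1), ?_, ?_⟩
        · have hL := rowlen_le_flatten E u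
          have hP : 1 ≤ (3 * E.flatten.length + 3) ^ f' := Nat.one_le_pow _ _ (by omega)
          have hk : kf ≤ E.flatten.length * (2 * (3 * E.flatten.length + 3) ^ f' + 1) :=
            le_trans hkf (Nat.mul_le_mul_right _ hL)
          rw [pow_succ]
          nlinarith
        · exact iter_chain _ (iter_chain _ e1 e2) e3

theorem runB_of_iter (A E : List (List Int)) :
    ∀ (k n : Nat) (s : List PVTask × List Int × List (List Int)) (vs' : List Int) (D' : List (List Int)),
      (stepB A E)^[k] s = ([], vs', D') → k ≤ n → runB A E n s = (vs', D') := by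
  intro k
  induction k with
  | zero =>
    intro n s vs' D' h _
    rw [Function.iterate_zero_apply] at h
    subst h
    cases n with
    | zero => rw [runB]
    | succ n' => rw [runB]
  | succ k' ih =>
    intro n s vs' D' h hk
    obtain ⟨ts, vs, D⟩ := s
    cases ts with
    | nil =>
      have hfix : stepB A E ([], vs, D) = ([], vs, D) := by simp [stepB]
      rw [Function.iterate_fixed hfix] at h
      obtain ⟨-, rfl, rfl⟩ : ([] : List PVTask) = [] ∧ vs = vs' ∧ D = D' := by simpa using h
      cases n with
      | zero => rw [runB]
      | succ n' => rw [runB]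
    | cons t ts' =>
      cases n with
      | zero => omega
      | succ n' =>
        rw [runB]
        rw [Function.iterate_succ_apply] at h
        exact ih n' _ vs' D' h (by omega)

-- assembling the two ports
theorem ports_agree (u color : Int) (A E D : List (List Int)) (r : Int) (D' : List (List Int))
    (h : solveA (D.flatten.length + 2) u color A E D = some (r, D')) :
    solve u color A E D = r ∧ solve_alt u color A E D = r := by
  constructor
  · unfold solve
    rw [h]
  · obtain ⟨k, hk, hiter⟩ := sim_solve A E (D.flatten.length + 2) u color D r D' h [] []
    have hrun := runB_of_iter A E k ((3 * E.flatten.length + 3) ^ (D.flatten.length + 2))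
      ([PVTask.call u color], [], D) [r] D' hiter hk
    unfold solve_alt
    rw [hrun]
    rfl

theorem pre_solveA_some (u color : Int) (A E D : List (List Int)) (hPre : Pre_solve u color A E D) :
    ∃ r D', solveA (D.flatten.length + 2) u color A E D = some (r, D') := by
  rcases hPre with ⟨hne, hneg⟩ | ⟨hu, hulen, hc, hA1, hD1, hArows, hDrows, hErows⟩
  · -- immediate memo hit
    cases hDu : PySem.List.pyGet? D u with
    | none => simp [hDu] at hne
    | some row =>
      have hne' : PySem.List.pyGet? row color ≠ none := by simpa [hDu] using hne
      have hneg' : PySem.List.pyGet? row color ≠ some (-1) := by simpa [hDu] using hneg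
      cases hrc : PySem.List.pyGet? row color with
      | none => simp [hrc] at hne'
      | some x =>
        rw [hrc] at hneg'
        have hx : x ≠ -1 := by simpa using hneg'
        have hcur : pyCellGet D u color = x := by
          unfold pyCellGet pyRowGet
          rw [hDu]
          simp only [Option.getD_some]
          rw [hrc]
          rfl
        refine ⟨x, D, ?_⟩
        rw [show D.flatten.length + 2 = D.flatten.length + 1 + 1 from rfl, solveA,
          if_pos (by rw [hcur]; exact hx), hcur]
  · -- well-formed instance: the fuel is sufficient
    obtain ⟨r, D', hs, -, -, -, -, -⟩ :=
      suf_solve A E ⟨hA1, hArows⟩ hErows (D.flatten.length + 2) u color D ⟨hD1, hDrows⟩ hu hulen hc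
        (by have := cnt_le_flatten D; omega)
    exact ⟨r, D', hs⟩

-- ===== VERDICT (by name: the statement is the Claim_ definition above) =====
theorem solve_spec : Claim_equal_solve := by
  intro u color A E D _hDom hPre
  obtain ⟨r, D', h⟩ := pre_solveA_some u color A E D hPre
  obtain ⟨h1, h2⟩ := ports_agree u color A E D r D' h
  unfold Spec_solve
  rw [h1, h2]
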